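-- pv_equiv track=rewrite | github.com/ahn-ji0/algorithm-study-2 | PCCP 모의고사 1회/2.py | solution
-- ===== SOURCE A (Python) =====
-- from itertools import permutations
--
-- def solution(ability):
--     answer = 0
--     num_students = len(ability)
--     num_categories = len(ability[0])
--     l = list(range(num_students))
--
--     max_ability = 0
--     for p in permutations(l, num_categories):
--         sum = 0
--         for category, student in enumerate(p):
--             sum += ability[student][category]
--         if sum >= max_ability:
--             max_ability = sum
--     return max_ability
-- ===== SOURCE B (Python) =====
-- def solution(ability):
--     k = len(ability[0])
--     n = len(ability)
--     if k > n:
--         return 0  # fewer students than categories: no full assignment exists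
--     size = 1 << k
--     # dp[mask] = best total over assignments of the categories in mask to
--     # distinct students among those processed so far (None = unreachable)
--     dp = [0 if mask == 0 else None for mask in range(size)]
--     for row in ability:
--         new = []
--         for mask in range(size):
--             best = dp[mask]
--             for j in range(k):
--                 if mask >> j & 1:
--                     prev = dp[mask ^ (1 << j)]
--                     if prev is not None and (best is None or prev + row[j] > best):
--                         best = prev + row[j]
--             new.append(best)
--         dp = new
--     top = dp[size - 1]
--     return top if top is not None and top > 0 else 0
-- ===== Notes on version B (the rewrite author's own statement) =====
-- stated objective: alternative
-- what changed: Replaces brute-force enumeration of all k-permutations of students (itertools.permutations, re-summing each tuple) by a bitmask dynamic program over subsets of categories, dp[mask] = best sum assigning the categories in mask to distinct students seen so far; intended as faster (measured 12.4x at the largest size where both finish), but unconfirmed at sizes where both time out.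
import Mathlib
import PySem

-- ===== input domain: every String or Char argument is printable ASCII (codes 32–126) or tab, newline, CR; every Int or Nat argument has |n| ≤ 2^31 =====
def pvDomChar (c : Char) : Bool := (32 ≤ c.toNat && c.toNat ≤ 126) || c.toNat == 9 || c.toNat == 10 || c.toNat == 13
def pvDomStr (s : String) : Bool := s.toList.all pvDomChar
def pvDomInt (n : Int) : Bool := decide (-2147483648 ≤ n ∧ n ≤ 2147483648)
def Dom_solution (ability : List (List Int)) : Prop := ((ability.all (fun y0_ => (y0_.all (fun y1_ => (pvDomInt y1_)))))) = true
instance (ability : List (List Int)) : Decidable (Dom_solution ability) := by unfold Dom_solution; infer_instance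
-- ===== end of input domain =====

-- B replaces A's enumeration of all k-permutations of students by a bitmask dynamic
-- program over subsets of categories (objective: alternative algorithm).

-- ===== PORT A =====
def solution (ability : List (List Int)) : Int :=
  let numStudents := ability.length
  let numCategories := ((PySem.List.pyGet? ability 0).getD []).length
  let l := PySem.List.pyRange 0 numStudents 1
  (PySem.List.permutations l numCategories).foldl (fun maxAbility p =>
    let s := (PySem.List.enumerate p).foldl (fun acc cs =>
      acc + PySem.List.pyGetD (PySem.List.pyGetD ability cs.2 []) cs.1 0) 0
    if s ≥ maxAbility then s else maxAbility) 0

-- ===== PORT B =====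
def solution_alt (ability : List (List Int)) : Int :=
  let k := ((PySem.List.pyGet? ability 0).getD []).length
  let n := ability.length
  if k > n then 0
  else
    let size := 1 <<< k
    let dp0 : List (Option Int) := (List.range size).map (fun mask => if mask = 0 then some (0 : Int) else none)
    let dpF := ability.foldl (fun dp row =>
      (List.range size).map (fun mask =>
        (List.range k).foldl (fun best j =>
          if mask >>> j &&& 1 = 1 then
            match dp.getD (mask ^^^ (1 <<< j)) none with
            | none => best
            | some prev =>
              let v := prev + row.getD j 0
              match best with
              | none => some v
              | some b => if v > b then some v else some b
          else best) (dp.getD mask none))) dp0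
    match dpF.getD (size - 1) none with
    | none => 0
    | some t => if t > 0 then t else 0

-- ===== PRECONDITION & SPEC =====
-- Pre_ excludes exactly the inputs where the Python A raises IndexError: the empty list
-- (ability[0]), and — when there are at least as many students as categories, so that the
-- permutation loop actually indexes every row — any row shorter than the first row.
def Pre_solution (ability : List (List Int)) : Prop :=
  ability ≠ [] ∧
  ((ability.headD []).length ≤ ability.length →
    ∀ row ∈ ability, (ability.headD []).length ≤ row.length)
instance (ability : List (List Int)) : Decidable (Pre_solution ability) := by
  unfold Pre_solution; infer_instance

def pvWitness_solution : List (List Int) := [[1, 2], [3, 4], [5, 6]]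

def Spec_solution (ability : List (List Int)) (out : Int) : Prop := out = solution_alt ability
instance (ability : List (List Int)) (out : Int) : Decidable (Spec_solution ability out) := by unfold Spec_solution; infer_instance

-- ===== CLAIM (what is proved, stated in full; the proofs are below) =====
def Claim_equal_solution : Prop := ∀ (ability : List (List Int)), Dom_solution ability → Pre_solution ability → Spec_solution ability (solution ability)

-- ===== LEMMAS AND PROOFS =====

-- optional max (none = "no assignment exists", i.e. -infinity)
def omax : Option Int → Option Int → Option Int
  | none, b => b
  | some a, none => some a
  | some a, some b => some (max a b)

def lmax? : List Int → Option Int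
  | [] => none
  | x :: xs => omax (some x) (lmax? xs)

-- the category bits of a mask
def bits (k mask : Nat) : List Nat := (List.range k).filter (fun j => mask.testBit j)

-- every achievable total for a mask of categories, the students being the REVERSED list
-- of the rows processed so far (mirrors B's dp recurrence)
def asgVals (k : Nat) : List (List Int) → Nat → List Int
  | [], mask => if mask = 0 then [0] else []
  | r :: rs, mask =>
      asgVals k rs mask ++
        (bits k mask).flatMap (fun j => (asgVals k rs (mask ^^^ (1 <<< j))).map (· + r.getD j 0))

-- an assignment as a partial injective map from categories to students, and its value
def aval (pre : List (List Int)) (f : Nat → Option Nat) (j : Nat) : Int :=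
  match f j with
  | some s => (pre.getD s []).getD j 0
  | none => 0

def ValidF (L k mask : Nat) (f : Nat → Option Nat) : Prop :=
  (∀ j, j < k → ((f j).isSome = mask.testBit j)) ∧
  (∀ j, k ≤ j → f j = none) ∧
  (∀ j1 j2 s, f j1 = some s → f j2 = some s → j1 = j2) ∧
  (∀ j s, f j = some s → s < L)

def Ach (pre : List (List Int)) (k mask : Nat) (v : Int) : Prop :=
  ∃ f, ValidF pre.length k mask f ∧ v = ∑ j ∈ Finset.range k, aval pre f j

theorem omax_none_right (a : Option Int) : omax a none = a := by cases a <;> rfl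

theorem omax_assoc (a b c : Option Int) : omax (omax a b) c = omax a (omax b c) := by
  cases a <;> cases b <;> cases c <;> simp [omax, max_assoc]

theorem lmax?_append (l1 l2 : List Int) : lmax? (l1 ++ l2) = omax (lmax? l1) (lmax? l2) := by
  induction l1 with
  | nil => rfl
  | cons x xs ih => simp [lmax?, ih, omax_assoc]

theorem lmax?_map_add (l : List Int) (c : Int) :
    lmax? (l.map (· + c)) = (lmax? l).map (· + c) := by
  induction l with
  | nil => rfl
  | cons x xs ih => cases h : lmax? xs <;> simp [lmax?, ih, h, omax]

theorem lmax?_eq_none_iff (l : List Int) : lmax? l = none ↔ l = [] := by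
  cases l with
  | nil => simp [lmax?]
  | cons x xs => cases h : lmax? xs <;> simp [lmax?, h, omax]

theorem lmax?_spec (l : List Int) (t : Int) (h : lmax? l = some t) :
    t ∈ l ∧ ∀ x ∈ l, x ≤ t := by
  induction l generalizing t with
  | nil => simp [lmax?] at h
  | cons x xs ih =>
      cases hx : lmax? xs with
      | none =>
          rw [lmax?, hx, omax_none_right] at h
          obtain rfl : x = t := by simpa using h
          have := (lmax?_eq_none_iff xs).1 hx
          subst this; simp
      | some m =>
          rw [lmax?, hx] at h
          simp [omax] at h
          obtain ⟨hm, hall⟩ := ih m hx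
          refine ⟨?_, ?_⟩
          · rcases le_total x m with hle | hle
            · rw [← h, max_eq_right hle]; exact List.mem_cons_of_mem _ hm
            · rw [← h, max_eq_left hle]; exact List.mem_cons_self
          · intro y hy
            rcases List.mem_cons.1 hy with rfl | hy
            · rw [← h]; exact le_max_left _ _
            · rw [← h]; exact le_trans (hall y hy) (le_max_right _ _)

theorem tb_iff (m j : Nat) : (m >>> j &&& 1 = 1) ↔ m.testBit j = true := by
  rw [Nat.testBit]
  rcases Nat.mod_two_eq_zero_or_one (m >>> j) with h | h <;>
    simp [Nat.and_one_is_mod, Nat.one_and_eq_mod_two, h]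

theorem tb_xor_ne (mask j i : Nat) (hij : i ≠ j) :
    (mask ^^^ (1 <<< j)).testBit i = mask.testBit i := by
  simp [Nat.testBit_xor, Nat.shiftLeft_eq, (Ne.symm hij)]

theorem tb_xor_self (mask j : Nat) :
    (mask ^^^ (1 <<< j)).testBit j = !mask.testBit j := by
  simp [Nat.testBit_xor, Nat.shiftLeft_eq]

theorem xor_lt (mask j k : Nat) (hm : mask < 2 ^ k) (hj : j < k) :
    mask ^^^ (1 <<< j) < 2 ^ k := by
  apply Nat.lt_pow_two_of_testBit
  intro i hi
  rw [tb_xor_ne mask j i (by omega)]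
  exact Nat.testBit_lt_two_pow (Nat.lt_of_lt_of_le hm (Nat.pow_le_pow_right (by norm_num) hi))
theorem ach_extend (pre : List (List Int)) (r : List Int) (k mask : Nat) (v : Int)
    (h : Ach pre k mask v) : Ach (pre ++ [r]) k mask v := by
  obtain ⟨f, ⟨hs, hk, hinj, hbd⟩, hv⟩ := h
  refine ⟨f, ⟨hs, hk, hinj, ?_⟩, ?_⟩
  · intro j s hjs
    have := hbd j s hjs
    simp only [List.length_append, List.length_cons, List.length_nil]
    omega
  · rw [hv]
    refine Finset.sum_congr rfl (fun i _ => ?_)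
    cases hfi : f i with
    | none => simp [aval, hfi]
    | some s => simp only [aval, hfi]; rw [List.getD_append _ _ _ _ (hbd i s hfi)]

theorem ach_use (pre : List (List Int)) (r : List Int) (k mask j : Nat) (w : Int)
    (hj : j < k) (hb : mask.testBit j = true)
    (h : Ach pre k (mask ^^^ (1 <<< j)) w) :
    Ach (pre ++ [r]) k mask (w + r.getD j 0) := by
  obtain ⟨f, ⟨hs, hk, hinj, hbd⟩, hv⟩ := h
  have hfj : f j = none := by
    have := hs j hj
    rw [tb_xor_self, hb] at this
    simpa using this
  refine ⟨Function.update f j (some pre.length), ⟨?_, ?_, ?_, ?_⟩, ?_⟩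
  · intro i hi
    by_cases hij : i = j
    · subst hij; simp [Function.update_self, hb]
    · rw [Function.update_of_ne hij]
      rw [hs i hi, tb_xor_ne mask j i hij]
  · intro i hi
    rw [Function.update_of_ne (by omega)]
    exact hk i hi
  · intro j1 j2 s h1 h2
    by_cases h1j : j1 = j <;> by_cases h2j : j2 = j
    · omega
    · subst h1j
      rw [Function.update_self] at h1
      rw [Function.update_of_ne h2j] at h2
      have := hbd j2 s h2
      simp at h1; omega
    · subst h2j
      rw [Function.update_self] at h2
      rw [Function.update_of_ne h1j] at h1
      have := hbd j1 s h1
      simp at h2; omega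
    · rw [Function.update_of_ne h1j] at h1
      rw [Function.update_of_ne h2j] at h2
      exact hinj j1 j2 s h1 h2
  · intro i s hi
    simp only [List.length_append, List.length_cons, List.length_nil]
    by_cases hij : i = j
    · subst hij; rw [Function.update_self] at hi; simp at hi; omega
    · rw [Function.update_of_ne hij] at hi
      have := hbd i s hi; omega
  · have hjmem : j ∈ Finset.range k := Finset.mem_range.2 hj
    rw [← Finset.add_sum_erase _ _ hjmem]
    have h1 : aval (pre ++ [r]) (Function.update f j (some pre.length)) j = r.getD j 0 := by
      simp only [aval, Function.update_self]
      rw [List.getD_append_right pre [r] [] pre.length (le_refl _)]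
      simp
    have h2 : ∑ i ∈ (Finset.range k).erase j, aval (pre ++ [r]) (Function.update f j (some pre.length)) i
        = ∑ i ∈ (Finset.range k).erase j, aval pre f i := by
      refine Finset.sum_congr rfl (fun i hi => ?_)
      have hij : i ≠ j := Finset.ne_of_mem_erase hi
      rw [show aval (pre ++ [r]) (Function.update f j (some pre.length)) i = aval (pre ++ [r]) f i by
        simp [aval, Function.update_of_ne hij]]
      cases hfi : f i with
      | none => simp [aval, hfi]
      | some s => simp only [aval, hfi]; rw [List.getD_append _ _ _ _ (hbd i s hfi)]
    have h3 : w = ∑ i ∈ (Finset.range k).erase j, aval pre f i := by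
      rw [hv, ← Finset.add_sum_erase _ _ hjmem]
      have : aval pre f j = 0 := by simp [aval, hfj]
      omega
    rw [h1, h2, ← h3]; ring

theorem ach_split (pre : List (List Int)) (r : List Int) (k mask : Nat) (v : Int)
    (hm : mask < 2 ^ k)
    (h : Ach (pre ++ [r]) k mask v) :
    Ach pre k mask v ∨
      ∃ j, j < k ∧ mask.testBit j = true ∧ Ach pre k (mask ^^^ (1 <<< j)) (v - r.getD j 0) := by
  obtain ⟨f, ⟨hs, hk, hinj, hbd⟩, hv⟩ := h
  by_cases hex : ∃ j, f j = some pre.length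
  · right
    obtain ⟨j, hj⟩ := hex
    have hjk : j < k := by
      by_contra hc
      rw [hk j (by omega)] at hj; simp at hj
    have hbj : mask.testBit j = true := by rw [← hs j hjk, hj]; rfl
    have hboundlt : ∀ i s, i ≠ j → f i = some s → s < pre.length := by
      intro i s hij hfi
      have h1 := hbd i s hfi
      simp only [List.length_append, List.length_cons, List.length_nil] at h1
      rcases Nat.lt_or_ge s pre.length with h2 | h2
      · exact h2
      · have hsp : s = pre.length := by omega
        rw [← hsp] at hj
        exact absurd (hinj i j s hfi hj) hij
    refine ⟨j, hjk, hbj, Function.update f j none, ⟨?_, ?_, ?_, ?_⟩, ?_⟩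
    · intro i hi
      by_cases hij : i = j
      · subst hij; rw [Function.update_self, tb_xor_self, hbj]; rfl
      · rw [Function.update_of_ne hij, hs i hi, tb_xor_ne mask j i hij]
    · intro i hi
      by_cases hij : i = j
      · subst hij; rw [Function.update_self]
      · rw [Function.update_of_ne hij]; exact hk i hi
    · intro j1 j2 s h1 h2
      by_cases h1j : j1 = j
      · subst h1j; rw [Function.update_self] at h1; simp at h1
      · by_cases h2j : j2 = j
        · subst h2j; rw [Function.update_self] at h2; simp at h2
        · rw [Function.update_of_ne h1j] at h1
          rw [Function.update_of_ne h2j] at h2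
          exact hinj j1 j2 s h1 h2
    · intro i s hi
      by_cases hij : i = j
      · subst hij; rw [Function.update_self] at hi; simp at hi
      · rw [Function.update_of_ne hij] at hi
        exact hboundlt i s hij hi
    · have hjmem : j ∈ Finset.range k := Finset.mem_range.2 hjk
      have h1 : aval (pre ++ [r]) f j = r.getD j 0 := by
        simp only [aval, hj]
        rw [List.getD_append_right pre [r] [] pre.length (le_refl _)]
        simp
      have h2 : ∑ i ∈ (Finset.range k).erase j, aval (pre ++ [r]) f i
          = ∑ i ∈ (Finset.range k).erase j, aval pre f i := by
        refine Finset.sum_congr rfl (fun i hi => ?_)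
        have hij : i ≠ j := Finset.ne_of_mem_erase hi
        cases hfi : f i with
        | none => simp [aval, hfi]
        | some s => simp only [aval, hfi]; rw [List.getD_append _ _ _ _ (hboundlt i s hij hfi)]
      have h4 : ∑ i ∈ Finset.range k, aval pre (Function.update f j none) i
          = ∑ i ∈ (Finset.range k).erase j, aval pre f i := by
        rw [← Finset.add_sum_erase _ _ hjmem]
        have hz : aval pre (Function.update f j none) j = 0 := by
          simp [aval, Function.update_self]
        rw [hz]
        have : ∑ i ∈ (Finset.range k).erase j, aval pre (Function.update f j none) i
            = ∑ i ∈ (Finset.range k).erase j, aval pre f i := by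
          refine Finset.sum_congr rfl (fun i hi => ?_)
          simp [aval, Function.update_of_ne (Finset.ne_of_mem_erase hi)]
        omega
      rw [h4, ← h2]
      rw [hv, ← Finset.add_sum_erase _ _ hjmem, h1]
      ring
  · left
    push_neg at hex
    refine ⟨f, ⟨hs, hk, hinj, ?_⟩, ?_⟩
    · intro i s hi
      have h1 := hbd i s hi
      simp only [List.length_append, List.length_cons, List.length_nil] at h1
      have : s ≠ pre.length := by
        intro hc; subst hc; exact hex i hi
      omega
    · rw [hv]
      refine Finset.sum_congr rfl (fun i _ => ?_)
      cases hfi : f i with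
      | none => simp [aval, hfi]
      | some s =>
          have h1 := hbd i s hfi
          simp only [List.length_append, List.length_cons, List.length_nil] at h1
          have hne : s ≠ pre.length := fun hc => hex i (hc ▸ hfi)
          simp only [aval, hfi]
          rw [List.getD_append _ _ _ _ (by omega)]

theorem mem_asgVals (k : Nat) (rev : List (List Int)) :
    ∀ (mask : Nat), mask < 2 ^ k → ∀ (v : Int),
      (v ∈ asgVals k rev mask ↔ Ach rev.reverse k mask v) := by
  induction rev with
  | nil =>
      intro mask hm v
      by_cases hm0 : mask = 0
      · subst hm0
        simp only [asgVals, if_pos rfl, List.mem_singleton, List.reverse_nil]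
        constructor
        · intro hv
          rw [show v = 0 by simpa using hv]
          refine ⟨fun _ => none, ⟨?_, ?_, ?_, ?_⟩, ?_⟩ <;> simp [aval, Nat.zero_testBit]
        · rintro ⟨f, ⟨hs, hk2, hinj, hbd⟩, hv⟩
          have hz : ∀ j ∈ Finset.range k, aval [] f j = 0 := by
            intro j hj
            have hnone : f j = none := by
              have := hs j (Finset.mem_range.1 hj)
              rw [Nat.zero_testBit] at this
              exact Option.not_isSome_iff_eq_none.1 (by simp [this])
            simp [aval, hnone]
          rw [hv, Finset.sum_congr rfl hz]
          simp
      · simp only [asgVals, if_neg hm0, List.mem_nil_iff, List.reverse_nil, false_iff]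
        rintro ⟨f, ⟨hs, hk2, hinj, hbd⟩, hv⟩
        have hex : ∃ i, mask.testBit i = true := by
          by_contra hc
          push_neg at hc
          exact hm0 (Nat.eq_of_testBit_eq fun i => by
            simp [Nat.zero_testBit, Bool.eq_false_iff.2 (hc i)])
        obtain ⟨i, hi⟩ := hex
        have hik : i < k := by
          by_contra hc
          have : mask < 2 ^ i :=
            Nat.lt_of_lt_of_le hm (Nat.pow_le_pow_right (by norm_num) (by omega))
          rw [Nat.testBit_lt_two_pow this] at hi
          exact Bool.noConfusion hi
        have := hs i hik
        rw [hi] at this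
        obtain ⟨s, hsome⟩ := Option.isSome_iff_exists.1 this
        have := hbd i s hsome
        simp at this
  | cons r rs ih =>
      intro mask hm v
      rw [List.reverse_cons]
      simp only [asgVals, List.mem_append, List.mem_flatMap, List.mem_map]
      constructor
      · rintro (h | ⟨j, hjb, x, hx, rfl⟩)
        · exact ach_extend _ r _ _ _ ((ih mask hm v).1 h)
        · simp only [bits, List.mem_filter, List.mem_range] at hjb
          exact ach_use _ r k mask j x hjb.1 hjb.2
            ((ih _ (xor_lt mask j k hm hjb.1) x).1 hx)
      · intro h
        rcases ach_split rs.reverse r k mask v hm h with h1 | ⟨j, hjk, hjb, h2⟩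
        · exact Or.inl ((ih mask hm v).2 h1)
        · refine Or.inr ⟨j, ?_, v - r.getD j 0,
            (ih _ (xor_lt mask j k hm hjk) _).2 h2, by ring⟩
          simp [bits, List.mem_filter, List.mem_range, hjk, hjb]
theorem mem_permutations_succ (xs : List Int) (r : Nat) (p : List Int) :
    p ∈ PySem.List.permutations xs (r + 1) ↔
      ∃ i, ∃ _ : i < xs.length, ∃ q ∈ PySem.List.permutations (xs.eraseIdx i) r, p = xs[i] :: q := by
  rw [PySem.List.permutations]
  simp only [List.mem_flatMap, List.mem_range]
  constructor
  · rintro ⟨i, hi, hp⟩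
    refine ⟨i, hi, ?_⟩
    rw [List.getElem?_eq_getElem hi] at hp
    simp only [List.mem_map] at hp
    obtain ⟨q, hq, rfl⟩ := hp
    exact ⟨q, hq, rfl⟩
  · rintro ⟨i, hi, q, hq, rfl⟩
    refine ⟨i, hi, ?_⟩
    rw [List.getElem?_eq_getElem hi]
    simp only [List.mem_map]
    exact ⟨q, hq, rfl⟩

theorem permutations_eq_nil : ∀ (r : Nat) (xs : List Int), xs.length < r →
    PySem.List.permutations xs r = [] := by
  intro r
  induction r with
  | zero => intro xs h; omega
  | succ r ih =>
      intro xs h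
      rw [PySem.List.permutations]
      apply List.flatMap_eq_nil_iff.2
      intro i hi
      rw [List.mem_range] at hi
      rw [List.getElem?_eq_getElem hi]
      simp only
      rw [ih (xs.eraseIdx i) (by rw [List.length_eraseIdx_of_lt hi]; omega)]
      rfl

theorem mem_eraseIdx_nodup (xs : List Int) (i : Nat) (hi : i < xs.length) (hnd : xs.Nodup) (y : Int) :
    y ∈ xs.eraseIdx i ↔ y ∈ xs ∧ y ≠ xs[i] := by
  have hd : xs.take i ++ xs[i] :: xs.drop (i + 1) = xs := by
    rw [show xs[i] :: xs.drop (i + 1) = xs.drop i from (List.getElem_cons_drop hi)]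
    exact List.take_append_drop i xs
  rw [List.eraseIdx_eq_take_drop_succ]
  have hnd' : (xs.take i ++ xs[i] :: xs.drop (i + 1)).Nodup := by rw [hd]; exact hnd
  rw [List.nodup_append] at hnd'
  obtain ⟨h1, h2, h3⟩ := hnd'
  rw [List.nodup_cons] at h2
  constructor
  · intro hy
    rw [List.mem_append] at hy
    constructor
    · rw [← hd, List.mem_append, List.mem_cons]; tauto
    · rintro rfl
      rcases hy with hy | hy
      · exact h3 _ hy _ List.mem_cons_self rfl
      · exact h2.1 hy
  · rintro ⟨hyxs, hne⟩
    rw [← hd, List.mem_append, List.mem_cons] at hyxs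
    rw [List.mem_append]
    tauto

theorem mem_permutations_iff : ∀ (r : Nat) (xs : List Int), xs.Nodup → ∀ p : List Int,
    (p ∈ PySem.List.permutations xs r ↔ (p.length = r ∧ p.Nodup ∧ ∀ x ∈ p, x ∈ xs)) := by
  intro r
  induction r with
  | zero =>
      intro xs hnd p
      show p ∈ [[]] ↔ _
      simp [List.length_eq_zero_iff, eq_comm]
      rintro rfl
      simp
  | succ r ih =>
      intro xs hnd p
      rw [mem_permutations_succ]
      constructor
      · rintro ⟨i, hi, q, hq, rfl⟩
        have hnd' : (xs.eraseIdx i).Nodup := List.Nodup.eraseIdx i hnd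
        obtain ⟨hlen, hqnd, hsub⟩ := (ih (xs.eraseIdx i) hnd' q).1 hq
        refine ⟨by simp [hlen], ?_, ?_⟩
        · rw [List.nodup_cons]
          exact ⟨fun hc => ((mem_eraseIdx_nodup xs i hi hnd _).1 (hsub _ hc)).2 rfl, hqnd⟩
        · intro x hx
          rcases List.mem_cons.1 hx with rfl | hx
          · exact List.getElem_mem hi
          · exact ((mem_eraseIdx_nodup xs i hi hnd _).1 (hsub _ hx)).1
      · rintro ⟨hlen, hpnd, hsub⟩
        cases p with
        | nil => simp at hlen
        | cons x q =>
            obtain ⟨i, hi, hxi⟩ := List.getElem_of_mem (hsub x List.mem_cons_self)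
            refine ⟨i, hi, q, ?_, by rw [hxi]⟩
            rw [List.nodup_cons] at hpnd
            refine (ih (xs.eraseIdx i) (List.Nodup.eraseIdx i hnd) q).2
              ⟨by simpa using hlen, hpnd.2, ?_⟩
            intro y hy
            rw [mem_eraseIdx_nodup xs i hi hnd y, hxi]
            exact ⟨hsub y (List.mem_cons_of_mem _ hy), fun hc => hpnd.1 (hc ▸ hy)⟩

theorem foldl_enumerate_sum (F : Int × Int → Int) :
    ∀ (p : List Int) (s : Int) (acc : Int),
      (PySem.List.enumerate p s).foldl (fun acc cs => acc + F cs) acc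
        = acc + ∑ j ∈ Finset.range p.length, F (s + (j : Int), p.getD j 0) := by
  intro p
  induction p with
  | nil => intro s acc; simp [PySem.List.enumerate]
  | cons x xs ih =>
      intro s acc
      rw [PySem.List.enumerate_cons, List.foldl_cons, ih (s + 1)]
      rw [List.length_cons, Finset.sum_range_succ']
      have hsum : ∑ j ∈ Finset.range xs.length, F (s + 1 + (j : Int), xs.getD j 0)
          = ∑ j ∈ Finset.range xs.length, F (s + ((j : Int) + 1), xs.getD j 0) :=
        Finset.sum_congr rfl (fun j _ => by
          rw [show s + 1 + (j : Int) = s + ((j : Int) + 1) by ring])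
      rw [hsum]
      have h0 : F (s + ((0 : Nat) : Int), (x :: xs).getD 0 0) = F (s, x) := by norm_num
      have hsucc : ∀ j ∈ Finset.range xs.length,
          F (s + (((j : Nat) + 1 : Nat) : Int), (x :: xs).getD (j + 1) 0)
            = F (s + ((j : Int) + 1), xs.getD j 0) := by
        intro j _
        rw [List.getD_cons_succ]
        push_cast
        ring_nf
      rw [Finset.sum_congr rfl hsucc, h0]
      ring

theorem pyGetD_toNat {α : Type} (xs : List α) (i : Int) (d : α) (h : 0 ≤ i) :
    PySem.List.pyGetD xs i d = xs.getD i.toNat d := by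
  have := PySem.List.pyGetD_natCast (xs := xs) (n := i.toNat) (d := d)
  rwa [Int.toNat_of_nonneg h] at this

theorem mem_scores (ability : List (List Int)) (k : Nat) (v : Int) :
    v ∈ (PySem.List.permutations (PySem.List.pyRange 0 (ability.length : Int) 1) k).map
          (fun p => (PySem.List.enumerate p).foldl (fun acc cs =>
            acc + PySem.List.pyGetD (PySem.List.pyGetD ability cs.2 []) cs.1 0) 0)
      ↔ Ach ability k (2 ^ k - 1) v := by
  have hndl : (PySem.List.pyRange 0 (ability.length : Int) 1).Nodup :=
    PySem.List.nodup_pyRange_one 0 _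
  have hscore : ∀ p : List Int, (∀ x ∈ p, 0 ≤ x ∧ x < (ability.length : Int)) →
      (PySem.List.enumerate p).foldl (fun acc cs =>
        acc + PySem.List.pyGetD (PySem.List.pyGetD ability cs.2 []) cs.1 0) 0
      = ∑ j ∈ Finset.range p.length, (ability.getD (p.getD j 0).toNat []).getD j 0 := by
    intro p hp
    rw [foldl_enumerate_sum (fun cs => PySem.List.pyGetD (PySem.List.pyGetD ability cs.2 []) cs.1 0) p 0 0]
    rw [zero_add]
    refine Finset.sum_congr rfl (fun j hj => ?_)
    rw [Finset.mem_range] at hj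
    have hmem : p.getD j 0 ∈ p := by
      rw [List.getD_eq_getElem p 0 hj]; exact List.getElem_mem hj
    have hnn : 0 ≤ p.getD j 0 := (hp _ hmem).1
    rw [show (0 : Int) + (j : Int) = ((j : Nat) : Int) by ring]
    rw [PySem.List.pyGetD_natCast]
    rw [pyGetD_toNat ability _ [] hnn]
  constructor
  · intro hv
    rw [List.mem_map] at hv
    obtain ⟨p, hp, rfl⟩ := hv
    obtain ⟨hlen, hpnd, hsub⟩ := (mem_permutations_iff k _ hndl p).1 hp
    have hrange : ∀ x ∈ p, 0 ≤ x ∧ x < (ability.length : Int) := by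
      intro x hx
      have := PySem.List.mem_pyRange_one.1 (hsub x hx)
      omega
    refine ⟨fun j => if h : j < k then some ((p.getD j 0).toNat) else none, ⟨?_, ?_, ?_, ?_⟩, ?_⟩
    · intro j hj
      dsimp only
      rw [dif_pos hj, Nat.testBit_two_pow_sub_one]
      simp [hj]
    · intro j hj; dsimp only; rw [dif_neg (by omega)]
    · intro j1 j2 s h1 h2
      dsimp only at h1 h2
      by_cases hj1 : j1 < k
      · by_cases hj2 : j2 < k
        · rw [dif_pos hj1] at h1
          rw [dif_pos hj2] at h2
          have e1 : (p.getD j1 0).toNat = s := by simpa using h1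
          have e2 : (p.getD j2 0).toNat = s := by simpa using h2
          have m1 : p.getD j1 0 ∈ p := by
            rw [List.getD_eq_getElem p 0 (by omega)]; exact List.getElem_mem (by omega)
          have m2 : p.getD j2 0 ∈ p := by
            rw [List.getD_eq_getElem p 0 (by omega)]; exact List.getElem_mem (by omega)
          have hv1 := (hrange _ m1).1
          have hv2 := (hrange _ m2).1
          have : p.getD j1 0 = p.getD j2 0 := by omega
          rw [List.getD_eq_getElem p 0 (by omega), List.getD_eq_getElem p 0 (by omega)] at this
          exact (List.Nodup.getElem_inj_iff hpnd).1 this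
        · rw [dif_neg hj2] at h2; exact absurd h2 (by simp)
      · rw [dif_neg hj1] at h1; exact absurd h1 (by simp)
    · intro j s hjs
      dsimp only at hjs
      by_cases hj : j < k
      · rw [dif_pos hj] at hjs
        have e1 : (p.getD j 0).toNat = s := by simpa using hjs
        have m1 : p.getD j 0 ∈ p := by
          rw [List.getD_eq_getElem p 0 (by omega)]; exact List.getElem_mem (by omega)
        have := hrange _ m1
        omega
      · rw [dif_neg hj] at hjs; exact absurd hjs (by simp)
    · rw [hscore p hrange, hlen]
      refine Finset.sum_congr rfl (fun j hj => ?_)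
      rw [Finset.mem_range] at hj
      simp only [aval]
      rw [dif_pos hj]
  · rintro ⟨f, ⟨hs, hk, hinj, hbd⟩, hv⟩
    have hsome : ∀ j, j < k → ∃ s, f j = some s := by
      intro j hj
      have := hs j hj
      rw [Nat.testBit_two_pow_sub_one] at this
      exact Option.isSome_iff_exists.1 (by rw [this]; simp [hj])
    set p : List Int := (List.range k).map (fun j => (((f j).getD 0 : Nat) : Int)) with hpdef
    have hplen : p.length = k := by simp [hpdef]
    have hgetp : ∀ j, j < k → p.getD j 0 = (((f j).getD 0 : Nat) : Int) := by
      intro j hj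
      rw [hpdef, List.getD_eq_getElem _ 0 (by simpa using hj)]
      simp
    have hpnd : p.Nodup := by
      rw [hpdef]
      refine (List.nodup_map_iff_inj_on List.nodup_range).2 ?_
      intro j1 hj1 j2 hj2 he
      rw [List.mem_range] at hj1 hj2
      obtain ⟨s1, hs1⟩ := hsome j1 hj1
      obtain ⟨s2, hs2⟩ := hsome j2 hj2
      rw [hs1, hs2] at he
      simp only [Option.getD_some] at he
      have : s1 = s2 := by exact_mod_cast he
      exact hinj j1 j2 s1 hs1 (this ▸ hs2)
    have hsub : ∀ x ∈ p, x ∈ PySem.List.pyRange 0 (ability.length : Int) 1 := by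
      intro x hx
      rw [hpdef, List.mem_map] at hx
      obtain ⟨j, hj, rfl⟩ := hx
      rw [List.mem_range] at hj
      obtain ⟨s, hs'⟩ := hsome j hj
      have := hbd j s hs'
      rw [PySem.List.mem_pyRange_one]
      rw [hs']
      simp only [Option.getD_some]
      omega
    rw [List.mem_map]
    refine ⟨p, (mem_permutations_iff k _ hndl p).2 ⟨hplen, hpnd, hsub⟩, ?_⟩
    have hrange : ∀ x ∈ p, 0 ≤ x ∧ x < (ability.length : Int) := by
      intro x hx
      have := PySem.List.mem_pyRange_one.1 (hsub x hx)
      omega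
    rw [hscore p hrange, hplen, hv]
    refine Finset.sum_congr rfl (fun j hj => ?_)
    rw [Finset.mem_range] at hj
    obtain ⟨s, hs'⟩ := hsome j hj
    rw [hgetp j hj, hs']
    simp [aval, hs']

theorem match_omax (o acc : Option Int) (c : Int) :
    (match o with
      | none => acc
      | some prev =>
        let v := prev + c
        match acc with
        | none => some v
        | some b => if v > b then some v else some b)
    = omax acc (o.map (· + c)) := by
  cases o with
  | none => cases acc <;> simp [omax]
  | some prev =>
      cases acc with
      | none => simp [omax]
      | some b =>
          simp only [Option.map_some, omax]
          by_cases h : prev + c > b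
          · rw [if_pos h, max_eq_right (by omega)]
          · rw [if_neg h, max_eq_left (by omega)]

theorem fold_inner (k : Nat) (rev : List (List Int)) (r : List Int) (mask : Nat)
    (hm : mask < 2 ^ k) :
    ∀ (js : List Nat), (∀ j ∈ js, j < k) → ∀ (acc : Option Int),
      js.foldl (fun best j =>
        if mask >>> j &&& 1 = 1 then
          match ((List.range (1 <<< k)).map (fun m => lmax? (asgVals k rev m))).getD
              (mask ^^^ (1 <<< j)) none with
          | none => best
          | some prev =>
            let v := prev + r.getD j 0
            match best with
            | none => some v
            | some b => if v > b then some v else some b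
        else best) acc
      = omax acc (lmax? ((js.filter (fun j => mask.testBit j)).flatMap
          (fun j => (asgVals k rev (mask ^^^ (1 <<< j))).map (· + r.getD j 0)))) := by
  intro js
  induction js with
  | nil => intro _ acc; simp [lmax?]; exact (omax_none_right acc).symm
  | cons j js ih =>
      intro hjs acc
      rw [List.foldl_cons]
      by_cases hbit : mask.testBit j
      · have hcond : (mask >>> j &&& 1 = 1) := (tb_iff mask j).2 hbit
        rw [if_pos hcond]
        have h2k : (1 : Nat) <<< k = 2 ^ k := by rw [Nat.shiftLeft_eq, one_mul]
        have hsz : mask ^^^ (1 <<< j) < 1 <<< k := by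
          rw [h2k]
          exact xor_lt mask j k hm (hjs j List.mem_cons_self)
        rw [PySem.List.getD_map_range _ _ _ _ hsz]
        rw [List.filter_cons_of_pos (by simp [hbit])]
        rw [List.flatMap_cons, lmax?_append]
        rw [match_omax]
        rw [ih (fun i hi => hjs i (List.mem_cons_of_mem _ hi))]
        rw [← omax_assoc]
        rw [lmax?_map_add]
      · have hcond : ¬(mask >>> j &&& 1 = 1) := fun hc => hbit ((tb_iff mask j).1 hc)
        rw [if_neg hcond]
        rw [List.filter_cons_of_neg (by simp [hbit])]
        exact ih (fun i hi => hjs i (List.mem_cons_of_mem _ hi)) acc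

theorem dp_inv (k : Nat) (rows : List (List Int)) :
    rows.foldl (fun dp row =>
      (List.range (1 <<< k)).map (fun mask =>
        (List.range k).foldl (fun best j =>
          if mask >>> j &&& 1 = 1 then
            match dp.getD (mask ^^^ (1 <<< j)) none with
            | none => best
            | some prev =>
              let v := prev + row.getD j 0
              match best with
              | none => some v
              | some b => if v > b then some v else some b
          else best) (dp.getD mask none)))
      ((List.range (1 <<< k)).map (fun mask => if mask = 0 then some (0 : Int) else none))
    = (List.range (1 <<< k)).map (fun mask => lmax? (asgVals k rows.reverse mask)) := by
  induction rows using List.reverseRecOn with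
  | nil =>
      rw [List.foldl_nil]
      refine List.map_congr_left (fun mask _ => ?_)
      by_cases h : mask = 0
      · subst h; rfl
      · simp [asgVals, h, lmax?]
  | append_singleton rows r ih =>
      rw [List.foldl_concat, ih]
      refine List.map_congr_left (fun mask hmask => ?_)
      rw [List.mem_range] at hmask
      have hm : mask < 2 ^ k := by rwa [Nat.shiftLeft_eq, one_mul] at hmask
      have hsz : mask < 1 <<< k := by rwa [Nat.shiftLeft_eq, one_mul]
      rw [PySem.List.getD_map_range _ _ _ _ hsz]
      rw [fold_inner k rows.reverse r mask hm (List.range k) (fun j hj => List.mem_range.1 hj)]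
      rw [show (rows ++ [r]).reverse = r :: rows.reverse by simp]
      show _ = lmax? (asgVals k rows.reverse mask ++ _)
      rw [lmax?_append]
      rfl

theorem foldl_if_max (ability : List (List Int)) (ps : List (List Int)) (a : Int) :
    ps.foldl (fun maxAbility p =>
      let s := (PySem.List.enumerate p).foldl (fun acc cs =>
        acc + PySem.List.pyGetD (PySem.List.pyGetD ability cs.2 []) cs.1 0) 0
      if s ≥ maxAbility then s else maxAbility) a
    = (ps.map (fun p => (PySem.List.enumerate p).foldl (fun acc cs =>
        acc + PySem.List.pyGetD (PySem.List.pyGetD ability cs.2 []) cs.1 0) 0)).foldl max a := by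
  rw [List.foldl_map]
  refine congrArg (fun f => List.foldl f a ps) ?_
  funext m p
  dsimp only
  split_ifs with h
  · exact (max_eq_right h).symm
  · exact (max_eq_left (by omega)).symm

theorem final_max (S V : List Int) (hmem : ∀ v, v ∈ S ↔ v ∈ V) :
    S.foldl max 0 = (match lmax? V with
      | none => (0 : Int)
      | some t => if t > 0 then t else 0) := by
  cases hl : lmax? V with
  | none =>
      have hV : V = [] := (lmax?_eq_none_iff V).1 hl
      have hS : S = [] := by
        cases hSc : S with
        | nil => rfl
        | cons x xs =>
            exfalso
            have : x ∈ V := (hmem x).1 (by rw [hSc]; exact List.mem_cons_self)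
            rw [hV] at this
            simp at this
      rw [hS]; rfl
  | some t =>
      show List.foldl max 0 S = if t > 0 then t else 0
      obtain ⟨htV, hub⟩ := lmax?_spec V t hl
      have htS : t ∈ S := (hmem t).2 htV
      obtain ⟨h0, hSub⟩ := PySem.List.le_foldl_max S (0 : Int)
      have hmm := PySem.List.foldl_max_mem S (0 : Int)
      by_cases ht : t > 0
      · rw [if_pos ht]
        refine le_antisymm ?_ (hSub t htS)
        rcases hmm with h | h
        · rw [h]; omega
        · exact hub _ ((hmem _).1 h)
      · rw [if_neg ht]
        refine le_antisymm ?_ h0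
        rcases hmm with h | h
        · rw [h]
        · have := hub _ ((hmem _).1 h)
          omega

theorem solution_eq (ability : List (List Int)) : solution ability = solution_alt ability := by
  simp only [solution, solution_alt]
  by_cases hkn : ((PySem.List.pyGet? ability 0).getD []).length > ability.length
  · rw [if_pos hkn]
    have hlen : (PySem.List.pyRange 0 (ability.length : Int) 1).length = ability.length := by
      rw [PySem.List.length_pyRange_one]; simp
    rw [permutations_eq_nil _ _ (by rw [hlen]; omega)]
    rfl
  · rw [if_neg hkn]
    rw [dp_inv]
    have hlt : (1 <<< ((PySem.List.pyGet? ability 0).getD []).length) - 1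
        < 1 <<< ((PySem.List.pyGet? ability 0).getD []).length := by
      rw [Nat.shiftLeft_eq, one_mul]
      have := Nat.one_le_two_pow (n := ((PySem.List.pyGet? ability 0).getD []).length)
      omega
    rw [PySem.List.getD_map_range _ _ _ _ hlt]
    rw [foldl_if_max]
    refine final_max _ _ (fun v => ?_)
    rw [mem_scores]
    rw [show (1 <<< ((PySem.List.pyGet? ability 0).getD []).length) - 1
        = 2 ^ ((PySem.List.pyGet? ability 0).getD []).length - 1 by
      rw [Nat.shiftLeft_eq, one_mul]]
    have h1 := mem_asgVals ((PySem.List.pyGet? ability 0).getD []).length ability.reverse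
      (2 ^ ((PySem.List.pyGet? ability 0).getD []).length - 1)
      (by have := Nat.two_pow_pos ((PySem.List.pyGet? ability 0).getD []).length; omega) v
    rw [List.reverse_reverse] at h1
    exact h1.symm

-- ===== VERDICT (by name: the statement is the Claim_ definition above) =====
theorem solution_spec : Claim_equal_solution := by
  intro ability _ _
  unfold Spec_solution
  exact solution_eq ability
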